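-- pv_equiv track=rewrite | github.com/sunain-s/First-Order-Logic-Tableau | skeleton.py | is_fol_atom
-- ===== SOURCE A (Python) =====
-- def is_fol_atom(fmla: str) -> bool:
--     '''Must match pattern P(t1,t2) where P in {P, Q, R, S} and t1,t2 are terms'''
--     if len(fmla) != 6:
--         return False
--     if fmla[0] not in ['P', 'Q', 'R', 'S']:
--         return False
--     if fmla[1] != '(' or fmla[3] != ',' or fmla[5] != ')':
--         return False
--
--     VARS = ['x', 'y', 'z', 'w']
--     CONSTS = [chr(c) for c in range(ord('a'), ord('z')+1)]
--     TERMS = VARS + CONSTS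
--     return fmla[2] in TERMS and fmla[4] in TERMS
-- ===== SOURCE B (Python) =====
-- def _step(state, ch):
--     if state == 0:
--         return 1 if ch in 'PQRS' else -1
--     if state == 1:
--         return 2 if ch == '(' else -1
--     if state == 2:
--         return 3 if 'a' <= ch <= 'z' else -1
--     if state == 3:
--         return 4 if ch == ',' else -1
--     if state == 4:
--         return 5 if 'a' <= ch <= 'z' else -1
--     if state == 5:
--         return 6 if ch == ')' else -1
--     return -1
--
-- def is_fol_atom(fmla: str) -> bool:
--     '''Must match pattern P(t1,t2) where P in {P, Q, R, S} and t1,t2 are terms'''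
--     state = 0
--     for ch in fmla:
--         state = _step(state, ch)
--     return state == 6
-- ===== Notes on version B (the rewrite author's own statement) =====
-- stated objective: alternative
-- what changed: A's length test plus positional indexing and membership in a built VARS+CONSTS list is replaced by a left-to-right finite-state machine: a single pass folds a transition function (states 0..6 with an absorbing reject state -1) over the characters and accepts iff the final state is 6.
import Mathlib
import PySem

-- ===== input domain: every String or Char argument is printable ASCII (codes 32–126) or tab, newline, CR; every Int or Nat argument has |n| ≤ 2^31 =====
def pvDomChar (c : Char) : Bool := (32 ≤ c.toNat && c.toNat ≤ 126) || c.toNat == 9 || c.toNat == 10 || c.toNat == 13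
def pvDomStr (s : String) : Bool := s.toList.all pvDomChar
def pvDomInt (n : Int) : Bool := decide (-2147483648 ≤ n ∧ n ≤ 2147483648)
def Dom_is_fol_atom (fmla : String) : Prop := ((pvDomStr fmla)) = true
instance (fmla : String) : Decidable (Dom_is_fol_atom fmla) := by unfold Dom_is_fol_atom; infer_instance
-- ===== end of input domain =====

-- B replaces A's length test plus positional list-membership checks by a left-to-right
-- DFA scan (states 0..6 with an absorbing reject state -1) over the characters
-- (objective: alternative).

-- ===== PORT A =====
-- A, step for step, on the code points (indices are in range after the length guard,
-- so fmla[i] is ported as pyGetD; CONSTS is built by the same range comprehension).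
def is_fol_atom (fmla : String) : Bool :=
  let s := fmla.toList
  if s.length ≠ 6 then false
  else if !(['P', 'Q', 'R', 'S'].contains (PySem.List.pyGetD s 0 'a')) then false
  else if PySem.List.pyGetD s 1 'a' ≠ '(' ∨ PySem.List.pyGetD s 3 'a' ≠ ','
            ∨ PySem.List.pyGetD s 5 'a' ≠ ')' then false
  else
    let VARS : List Char := ['x', 'y', 'z', 'w']
    let CONSTS : List Char := (PySem.List.pyRange 97 123 1).map (fun c => Char.ofNat c.toNat)
    let TERMS := VARS ++ CONSTS
    TERMS.contains (PySem.List.pyGetD s 2 'a') && TERMS.contains (PySem.List.pyGetD s 4 'a')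

-- ===== PORT B =====
-- Source B's _step: the DFA transition function; 'ch in "PQRS"' is char membership in the
-- one-char substrings, exact here as list membership; '"a" <= ch <= "z"' is Char ≤.
def pvStep (state : Int) (ch : Char) : Int :=
  if state == 0 then (if "PQRS".toList.contains ch then 1 else -1)
  else if state == 1 then (if ch == '(' then 2 else -1)
  else if state == 2 then (if 'a' ≤ ch && ch ≤ 'z' then 3 else -1)
  else if state == 3 then (if ch == ',' then 4 else -1)
  else if state == 4 then (if 'a' ≤ ch && ch ≤ 'z' then 5 else -1)
  else if state == 5 then (if ch == ')' then 6 else -1)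
  else -1

-- Source B's loop 'for ch in fmla: state = _step(state, ch)' is the foldl over the chars.
def is_fol_atom_alt (fmla : String) : Bool :=
  (fmla.toList.foldl pvStep 0) == 6

-- ===== PRECONDITION & SPEC =====
def Spec_is_fol_atom (fmla : String) (out : Bool) : Prop := out = is_fol_atom_alt fmla
instance (fmla : String) (out : Bool) : Decidable (Spec_is_fol_atom fmla out) := by unfold Spec_is_fol_atom; infer_instance

-- ===== CLAIM (what is proved, stated in full; the proofs are below) =====
def Claim_equal_is_fol_atom : Prop := ∀ (fmla : String), Dom_is_fol_atom fmla → Spec_is_fol_atom fmla (is_fol_atom fmla)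

-- ===== LEMMAS AND PROOFS =====

-- Each DFA step either advances the state by one or rejects.
theorem pv_step_cases (s : Int) (ch : Char) : pvStep s ch = s + 1 ∨ pvStep s ch = -1 := by
  unfold pvStep
  split_ifs with h1 h2 h3 h4 h5 h6 <;> simp_all

-- The reject state is absorbing.
theorem pv_absorb (l : List Char) : l.foldl pvStep (-1) = -1 := by
  induction l with
  | nil => rfl
  | cons a t ih => simpa [List.foldl, pvStep] using ih

-- After consuming l from state s, the DFA is at s + |l| or rejected.
theorem pv_run (l : List Char) (s : Int) :
    l.foldl pvStep s = s + l.length ∨ l.foldl pvStep s = -1 := by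
  induction l generalizing s with
  | nil => left; simp
  | cons a t ih =>
    rcases pv_step_cases s a with h | h
    · rcases ih (s + 1) with h2 | h2
      · left; simp [List.foldl, h, h2]; ring
      · right; simp [List.foldl, h, h2]
    · right; simp [List.foldl, h, pv_absorb]

-- A's term disjunction (x|y|z|w|a..z membership, as norm_num leaves it) is 'a' ≤ c ≤ 'z'.
theorem pv_terms_mem (c : Char) :
    (c == 'x' || (c == 'y' || (c == 'z' || (c == 'w' ||
        decide (c ∈ List.map (fun n => Char.ofNat n.toNat) (PySem.List.pyRange 97 123)))))) = ('a' ≤ c && c ≤ 'z') := by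
  have h : List.map (fun n => Char.ofNat n.toNat) (PySem.List.pyRange 97 123) = ['a','b','c','d','e','f','g','h','i','j','k','l','m','n','o','p','q','r','s','t','u','v','w','x','y','z'] := by decide
  rw [h, Bool.eq_iff_iff]
  simp only [Bool.or_eq_true, beq_iff_eq, decide_eq_true_eq, List.mem_cons, List.not_mem_nil,
    or_false, Bool.and_eq_true]
  constructor
  · rintro (h|h|h|h|h|h|h|h|h|h|h|h|h|h|h|h|h|h|h|h|h|h|h|h|h|h|h|h|h|h) <;>
      (rw [h]; exact ⟨by decide, by decide⟩)
  · rintro ⟨h1, h2⟩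
    rw [Char.le_def, UInt32.le_iff_toNat_le] at h1 h2
    have hc1 : 97 ≤ c.toNat := h1
    have hc2 : c.toNat ≤ 122 := h2
    interval_cases h : c.toNat <;> simp_all [Char.ext_iff, ← UInt32.toNat_inj]

-- The reject state stays rejected under one more step.
theorem pvStep_bot (ch : Char) : pvStep (-1) ch = -1 := rfl

-- Running the DFA from state 1 over the last five characters accepts iff each check passes.
theorem pv_tail (lb t1 co t2 rb : Char) :
    (pvStep (pvStep (pvStep (pvStep (pvStep 1 lb) t1) co) t2) rb == 6)
      = (decide (lb = '(') && (decide (co = ',') && decide (rb = ')')) &&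
          (('a' ≤ t1 && t1 ≤ 'z') && ('a' ≤ t2 && t2 ≤ 'z'))) := by
  by_cases c2 : lb = '('
  · have e2 : pvStep 1 lb = 2 := by simp [pvStep, c2]
    rw [e2]
    by_cases c3 : ('a' ≤ t1 && t1 ≤ 'z') = true
    · have e3 : pvStep 2 t1 = 3 := by simp [pvStep, c3]
      rw [e3]
      by_cases c4 : co = ','
      · have e4 : pvStep 3 co = 4 := by simp [pvStep, c4]
        rw [e4]
        by_cases c5 : ('a' ≤ t2 && t2 ≤ 'z') = true
        · have e5 : pvStep 4 t2 = 5 := by simp [pvStep, c5]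
          rw [e5]
          by_cases c6 : rb = ')'
          · have e6 : pvStep 5 rb = 6 := by simp [pvStep, c6]
            rw [e6]; simp [c2, c3, c4, c5, c6]
          · have e6 : pvStep 5 rb = -1 := by simp [pvStep, c6]
            rw [e6]; simp [c6]
        · have e5 : pvStep 4 t2 = -1 := by simp [pvStep, c5]
          rw [e5, pvStep_bot]; simp [c5]
      · have e4 : pvStep 3 co = -1 := by simp [pvStep, c4]
        rw [e4, pvStep_bot, pvStep_bot]; simp [c4]
    · have e3 : pvStep 2 t1 = -1 := by simp [pvStep, c3]
      rw [e3, pvStep_bot, pvStep_bot, pvStep_bot]; simp [c3]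
  · have e2 : pvStep 1 lb = -1 := by simp [pvStep, c2]
    rw [e2, pvStep_bot, pvStep_bot, pvStep_bot, pvStep_bot]; simp [c2]

-- Running the DFA over exactly six characters accepts iff each positional check passes.
theorem pv_dfa_six (p lb t1 co t2 rb : Char) :
    (pvStep (pvStep (pvStep (pvStep (pvStep (pvStep 0 p) lb) t1) co) t2) rb == 6)
      = ((decide (p = 'P') || (decide (p = 'Q') || (decide (p = 'R') || decide (p = 'S')))) &&
          (decide (lb = '(') && (decide (co = ',') && decide (rb = ')')) &&
            (('a' ≤ t1 && t1 ≤ 'z') && ('a' ≤ t2 && t2 ≤ 'z')))) := by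
  by_cases c1 : p = 'P' ∨ p = 'Q' ∨ p = 'R' ∨ p = 'S'
  · have e1 : pvStep 0 p = 1 := by rcases c1 with rfl | rfl | rfl | rfl <;> rfl
    have hd : (decide (p = 'P') || (decide (p = 'Q') || (decide (p = 'R') || decide (p = 'S')))) = true := by
      rcases c1 with rfl | rfl | rfl | rfl <;> simp
    rw [e1, pv_tail, hd]
    simp
  · push Not at c1
    have e1 : pvStep 0 p = -1 := by simp [pvStep, c1.1, c1.2.1, c1.2.2.1, c1.2.2.2]
    rw [e1, pvStep_bot, pvStep_bot, pvStep_bot, pvStep_bot, pvStep_bot]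
    simp [c1.1, c1.2.1, c1.2.2.1, c1.2.2.2]

-- On a six-character string both programs compute the same conjunction of checks.
theorem pv_six (fmla : String) (p lb t1 co t2 rb : Char)
    (h : fmla.toList = [p, lb, t1, co, t2, rb]) :
    is_fol_atom fmla = is_fol_atom_alt fmla := by
  unfold is_fol_atom is_fol_atom_alt
  rw [h]
  rw [if_neg (by simp)]
  rw [PySem.List.pyGetD_ofNat', PySem.List.pyGetD_ofNat', PySem.List.pyGetD_ofNat',
      PySem.List.pyGetD_ofNat', PySem.List.pyGetD_ofNat', PySem.List.pyGetD_ofNat']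
  norm_num [List.getD_cons_succ, List.getD_cons_zero]
  rw [pv_terms_mem, pv_terms_mem, pv_dfa_six]

-- ===== VERDICT (by name: the statement is the Claim_ definition above) =====
theorem is_fol_atom_spec : Claim_equal_is_fol_atom := by
  intro fmla _
  show is_fol_atom fmla = is_fol_atom_alt fmla
  by_cases hl : fmla.toList.length = 6
  · obtain ⟨p, lb, t1, co, t2, rb, h⟩ :
        ∃ p lb t1 co t2 rb, fmla.toList = [p, lb, t1, co, t2, rb] := by
      match hL : fmla.toList, hl with
      | [p, lb, t1, co, t2, rb], _ => exact ⟨p, lb, t1, co, t2, rb, rfl⟩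
    exact pv_six fmla p lb t1 co t2 rb h
  · unfold is_fol_atom is_fol_atom_alt
    rw [if_pos hl]
    rcases pv_run fmla.toList 0 with h | h
    · rw [h]; symm; simp only [beq_eq_false_iff_ne, ne_eq]; intro hc; apply hl; omega
    · rw [h]; rfl
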